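-- pv_equiv track=rewrite | github.com/Jackie2049/prefix-0501 | dependency/PrefixTrain_dev/runtime/megatron/prefix_match.py | min_with_trie
-- ===== SOURCE A (Python) =====
-- from typing import List, Dict, Optional
--
-- class TrieNode:
--     __slots__ = ("children", "request_idx")
--     def __init__(self):
--         self.children = {}  # token -> TrieNode
--         self.request_idx = -1  # 该节点对应的请求序列索引
--
-- def min_with_trie(token_lists: List[List[int]]) -> int:
--     """
--     全局最优（允许任意重排）情况下需要计算的最小 token 数。
--     等价于把所有序列插入同一 Trie，新增的节点数就是需要计算的 token 数。
--     """
--     root = TrieNode()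
--     node_count = 0
--     for seq in token_lists:
--         node = root
--         for tok in seq:
--             if tok not in node.children:
--                 node.children[tok] = TrieNode()
--                 node_count += 1
--             node = node.children[tok]
--     return node_count
-- ===== SOURCE B (Python) =====
-- from typing import List
--
-- def min_with_trie(token_lists: List[List[int]]) -> int:
--     # The trie's node count equals the number of distinct non-empty prefixes.
--     seen = set()
--     for seq in token_lists:
--         prefix = ()
--         for tok in seq:
--             prefix += (tok,)
--             seen.add(prefix)
--     return len(seen)
-- ===== Notes on version B (the rewrite author's own statement) =====
-- stated objective: simpler
-- what changed: Replaces the linked TrieNode structure and its per-node child-dict walk with a single set of prefix tuples: every non-empty prefix of every sequence is added to one set and the answer is its cardinality, since trie nodes correspond one-to-one to distinct non-empty prefixes.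
import Mathlib
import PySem

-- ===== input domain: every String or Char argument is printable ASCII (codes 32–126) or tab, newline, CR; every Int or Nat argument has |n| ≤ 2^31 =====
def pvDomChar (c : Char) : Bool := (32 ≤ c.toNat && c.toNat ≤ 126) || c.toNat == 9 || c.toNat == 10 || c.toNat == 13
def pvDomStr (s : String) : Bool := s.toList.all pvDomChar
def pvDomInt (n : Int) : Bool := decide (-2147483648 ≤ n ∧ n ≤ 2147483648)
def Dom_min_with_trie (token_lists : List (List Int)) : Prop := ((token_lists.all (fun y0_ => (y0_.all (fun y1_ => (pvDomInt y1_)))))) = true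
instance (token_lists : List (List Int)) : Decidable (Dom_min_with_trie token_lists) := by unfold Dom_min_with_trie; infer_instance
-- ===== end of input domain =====

-- B replaces A's linked trie (TrieNode objects with child dicts) by a single set of
-- distinct non-empty prefixes; same value, simpler structure (objective: simpler).

-- ===== PORT A =====
-- A's TrieNode: children is an insertion-ordered dict token -> TrieNode (the unused
-- request_idx field is dropped).  Encoded as a mutual pair (no nested inductive).
mutual
inductive Trie where
  | mk : ChildList → Trie
inductive ChildList where
  | nil : ChildList
  | cons : Int → Trie → ChildList → ChildList
end

-- dict lookup: first (unique) matching key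
def findC (k : Int) : ChildList → Option Trie
  | .nil => none
  | .cons k' t r => if k' = k then some t else findC k r

-- writing back the mutated child node at key k (key present, kept in place)
def updateC (k : Int) (c : Trie) : ChildList → ChildList
  | .nil => .nil
  | .cons k' t r => if k' = k then .cons k' c r else .cons k' t (updateC k c r)

-- dict insertion of a fresh key (appends, Python dict insertion order)
def appendC : ChildList → Int → Trie → ChildList
  | .nil, k, c => .cons k c .nil
  | .cons k' t r, k, c => .cons k' t (appendC r k c)

-- the inner `for tok in seq` loop: walk/extend the trie, threading node_count
def insertSeq : Trie → Int → List Int → Trie × Int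
  | t, c, [] => (t, c)
  | .mk cs, c, tok :: rest =>
    match findC tok cs with
    | some child =>
        let p := insertSeq child c rest
        (.mk (updateC tok p.1 cs), p.2)
    | none =>
        let p := insertSeq (.mk .nil) (c + 1) rest
        (.mk (appendC cs tok p.1), p.2)

def stepA (st : Trie × Int) (seq : List Int) : Trie × Int := insertSeq st.1 st.2 seq

def min_with_trie (token_lists : List (List Int)) : Int :=
  (token_lists.foldl stepA (Trie.mk .nil, 0)).2

-- ===== PORT B =====
-- inner loop: prefix += (tok,); seen.add(prefix)
def bInner (st : List Int × PySem.Set (List Int)) (tok : Int) : List Int × PySem.Set (List Int) :=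
  let pr := st.1 ++ [tok]
  (pr, PySem.Set.add st.2 pr)

def bOuter (seen : PySem.Set (List Int)) (seq : List Int) : PySem.Set (List Int) :=
  (seq.foldl bInner ([], seen)).2

def min_with_trie_alt (token_lists : List (List Int)) : Int :=
  PySem.Set.len (token_lists.foldl bOuter PySem.Set.empty)

-- ===== PRECONDITION & SPEC =====
def Spec_min_with_trie (token_lists : List (List Int)) (out : Int) : Prop := out = min_with_trie_alt token_lists
instance (token_lists : List (List Int)) (out : Int) : Decidable (Spec_min_with_trie token_lists out) := by unfold Spec_min_with_trie; infer_instance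

-- ===== CLAIM (what is proved, stated in full; the proofs are below) =====
def Claim_equal_min_with_trie : Prop := ∀ (token_lists : List (List Int)), Dom_min_with_trie token_lists → Spec_min_with_trie token_lists (min_with_trie token_lists)

-- ===== LEMMAS AND PROOFS =====

-- keys of a children dict, in order
def keysC : ChildList → List Int
  | .nil => []
  | .cons k _ r => k :: keysC r

mutual
def sizeT : Trie → Nat
  | .mk cs => sizeC cs
def sizeC : ChildList → Nat
  | .nil => 0
  | .cons _ t r => 1 + sizeT t + sizeC r
end

-- all non-empty paths (token sequences) ending at a node of the trie
mutual
def pathsT : Trie → List (List Int)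
  | .mk cs => pathsC cs
def pathsC : ChildList → List (List Int)
  | .nil => []
  | .cons k t r => [k] :: ((pathsT t).map (k :: ·) ++ pathsC r)
end

-- well-formedness: keys unique at every node (invariant of A's dict)
mutual
def WFT : Trie → Prop
  | .mk cs => WFC cs ∧ (keysC cs).Nodup
def WFC : ChildList → Prop
  | .nil => True
  | .cons _ t r => WFT t ∧ WFC r
end

-- the non-empty prefixes of a sequence, in order
def prefixesNE : List Int → List (List Int)
  | [] => []
  | a :: l => [a] :: (prefixesNE l).map (a :: ·)

theorem findC_eq_none_iff (k : Int) : ∀ cs : ChildList, findC k cs = none ↔ k ∉ keysC cs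
  | .nil => by simp [findC, keysC]
  | .cons k' t r => by
    by_cases h : k' = k
    · simp [findC, keysC, h]
    · simp only [findC, keysC, if_neg h, findC_eq_none_iff k r, List.mem_cons]
      constructor
      · rintro hk (rfl | hm)
        · exact h rfl
        · exact hk hm
      · intro hk hm; exact hk (Or.inr hm)

theorem WFT_of_findC {k : Int} {c : Trie} : ∀ {cs : ChildList}, findC k cs = some c → WFC cs → WFT c
  | .nil, h, _ => by simp [findC] at h
  | .cons k' t r, h, hw => by
    by_cases hk : k' = k
    · simp [findC, hk] at h; exact h ▸ hw.1
    · exact WFT_of_findC (by simpa [findC, hk] using h) hw.2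

theorem head_of_mem_pathsC {p : List Int} : ∀ {cs : ChildList}, p ∈ pathsC cs →
    ∃ k q, p = k :: q ∧ k ∈ keysC cs
  | .nil, h => by simp [pathsC] at h
  | .cons k t r, h => by
    simp only [pathsC, List.mem_cons, List.mem_append, List.mem_map] at h
    rcases h with rfl | ⟨q, _, rfl⟩ | hm
    · exact ⟨k, [], rfl, by simp [keysC]⟩
    · exact ⟨k, q, rfl, by simp [keysC]⟩
    · obtain ⟨k', q', hp, hk⟩ := head_of_mem_pathsC hm
      exact ⟨k', q', hp, by simp [keysC, hk]⟩

theorem nil_not_mem_pathsC (cs : ChildList) : ([] : List Int) ∉ pathsC cs := by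
  intro h
  obtain ⟨k, q, hp, _⟩ := head_of_mem_pathsC h
  simp at hp

theorem keysC_updateC (k : Int) (c : Trie) : ∀ cs : ChildList, keysC (updateC k c cs) = keysC cs
  | .nil => rfl
  | .cons k' t r => by
    by_cases h : k' = k
    · simp [updateC, keysC, h]
    · simp [updateC, keysC, h, keysC_updateC k c r]

theorem keysC_appendC (k : Int) (c : Trie) : ∀ cs : ChildList, keysC (appendC cs k c) = keysC cs ++ [k]
  | .nil => rfl
  | .cons k' t r => by simp [appendC, keysC, keysC_appendC k c r]

theorem WFC_updateC {k : Int} {c : Trie} (hc : WFT c) : ∀ {cs : ChildList}, WFC cs → WFC (updateC k c cs)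
  | .nil, _ => trivial
  | .cons k' t r, hw => by
    by_cases h : k' = k
    · simpa [updateC, WFC, h] using ⟨hc, hw.2⟩
    · simpa [updateC, WFC, h] using ⟨hw.1, WFC_updateC hc hw.2⟩

theorem WFC_appendC {k : Int} {c : Trie} (hc : WFT c) : ∀ {cs : ChildList}, WFC cs → WFC (appendC cs k c)
  | .nil, _ => ⟨hc, trivial⟩
  | .cons _ _ _, hw => ⟨hw.1, WFC_appendC hc hw.2⟩

theorem sizeC_updateC {k : Int} {c : Trie} {t' : Trie} : ∀ {cs : ChildList}, findC k cs = some c →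
    sizeC (updateC k t' cs) + sizeT c = sizeC cs + sizeT t'
  | .nil, h => by simp [findC] at h
  | .cons k' t r, h => by
    by_cases hk : k' = k
    · simp only [findC, if_pos hk, Option.some.injEq] at h
      simp [updateC, sizeC, hk, h]; omega
    · have := sizeC_updateC (t' := t') (cs := r) (by simpa [findC, hk] using h)
      simp only [updateC, if_neg hk, sizeC]; omega

theorem sizeC_appendC (k : Int) (c : Trie) : ∀ cs : ChildList, sizeC (appendC cs k c) = sizeC cs + (1 + sizeT c)
  | .nil => by simp [appendC, sizeC]
  | .cons k' t r => by simp [appendC, sizeC, sizeC_appendC k c r]; omega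

theorem pathsC_appendC (k : Int) (c : Trie) : ∀ cs : ChildList,
    pathsC (appendC cs k c) = pathsC cs ++ ([k] :: (pathsT c).map (k :: ·))
  | .nil => by simp [appendC, pathsC]
  | .cons k' t r => by simp [appendC, pathsC, pathsC_appendC k c r]

theorem mem_pathsC_of_findC {k : Int} {c : Trie} : ∀ {cs : ChildList}, findC k cs = some c →
    [k] ∈ pathsC cs ∧ ∀ q ∈ pathsT c, k :: q ∈ pathsC cs
  | .nil, h => by simp [findC] at h
  | .cons k' t r, h => by
    by_cases hk : k' = k
    · simp only [findC, if_pos hk, Option.some.injEq] at h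
      subst hk; subst h
      constructor
      · simp [pathsC]
      · intro q hq
        simp only [pathsC, List.mem_cons, List.mem_append, List.mem_map]
        exact Or.inr (Or.inl ⟨q, hq, rfl⟩)
    · obtain ⟨h1, h2⟩ := mem_pathsC_of_findC (cs := r) (by simpa [findC, hk] using h)
      constructor
      · simp [pathsC, h1]
      · intro q hq
        simp only [pathsC, List.mem_cons, List.mem_append]
        exact Or.inr (Or.inr (h2 q hq))

theorem mem_pathsC_updateC {k : Int} {c : Trie} (t' : Trie) (p : List Int) :
    ∀ {cs : ChildList}, (keysC cs).Nodup → findC k cs = some c →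
    (p ∈ pathsC (updateC k t' cs) ↔
      (p ∈ pathsC cs ∧ ∀ q, p = k :: q → q ∉ pathsT c) ∨ p = [k] ∨ ∃ q ∈ pathsT t', p = k :: q)
  | .nil, _, h => by simp [findC] at h
  | .cons k₀ t₀ r, hnd, h => by
    have hnd' : (keysC r).Nodup := (List.nodup_cons.mp (by simpa [keysC] using hnd)).2
    have hk₀ : k₀ ∉ keysC r := (List.nodup_cons.mp (by simpa [keysC] using hnd)).1
    by_cases hk : k₀ = k
    · subst hk
      simp only [findC, if_true] at h
      injection h with h
      subst h
      rw [show updateC k₀ t' (ChildList.cons k₀ t₀ r) = ChildList.cons k₀ t' r from by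
        simp [updateC]]
      simp only [pathsC, List.mem_cons, List.mem_append, List.mem_map]
      constructor
      · rintro (rfl | ⟨q, hq, rfl⟩ | hm)
        · exact Or.inr (Or.inl rfl)
        · exact Or.inr (Or.inr ⟨q, hq, rfl⟩)
        · refine Or.inl ⟨Or.inr (Or.inr hm), ?_⟩
          rintro q rfl hq
          obtain ⟨k', q', hp, hk'⟩ := head_of_mem_pathsC hm
          rw [List.cons.injEq] at hp
          exact hk₀ (hp.1 ▸ hk')
      · rintro (⟨hp, H⟩ | rfl | ⟨q, hq, rfl⟩)
        · rcases hp with rfl | ⟨q, hq, rfl⟩ | hm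
          · exact Or.inl rfl
          · exact absurd hq (H q rfl)
          · exact Or.inr (Or.inr hm)
        · exact Or.inl rfl
        · exact Or.inr (Or.inl ⟨q, hq, rfl⟩)
    · have h' : findC k r = some c := by simpa [findC, hk] using h
      have IH := mem_pathsC_updateC t' p hnd' h'
      simp only [updateC, if_neg hk, pathsC, List.mem_cons, List.mem_append, List.mem_map]
      constructor
      · rintro (rfl | ⟨q, hq, rfl⟩ | hm)
        · exact Or.inl ⟨Or.inl rfl, by rintro q hpq; rw [List.cons.injEq] at hpq; exact absurd hpq.1 hk⟩
        · exact Or.inl ⟨Or.inr (Or.inl ⟨q, hq, rfl⟩), by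
            rintro q' hpq; rw [List.cons.injEq] at hpq; exact absurd hpq.1 hk⟩
        · rcases IH.mp hm with ⟨hp, H⟩ | rfl | ⟨q, hq, rfl⟩
          · exact Or.inl ⟨Or.inr (Or.inr hp), H⟩
          · exact Or.inr (Or.inl rfl)
          · exact Or.inr (Or.inr ⟨q, hq, rfl⟩)
      · rintro (⟨hp, H⟩ | rfl | ⟨q, hq, rfl⟩)
        · rcases hp with rfl | ⟨q, hq, rfl⟩ | hm
          · exact Or.inl rfl
          · exact Or.inr (Or.inl ⟨q, hq, rfl⟩)
          · exact Or.inr (Or.inr (IH.mpr (Or.inl ⟨hm, H⟩)))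
        · exact Or.inr (Or.inr (IH.mpr (Or.inr (Or.inl rfl))))
        · exact Or.inr (Or.inr (IH.mpr (Or.inr (Or.inr ⟨q, hq, rfl⟩))))

theorem nil_not_mem_pathsT : ∀ t : Trie, ([] : List Int) ∉ pathsT t
  | .mk cs => nil_not_mem_pathsC cs

theorem insertSeq_snd (s : List Int) : ∀ (t : Trie) (c : Int),
    (insertSeq t c s).2 = c + ((sizeT (insertSeq t c s).1 : Int) - (sizeT t : Int)) := by
  induction s with
  | nil => intro t c; simp [insertSeq]
  | cons tok rest ih =>
    rintro ⟨cs⟩ c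
    rcases hf : findC tok cs with _ | child
    · simp only [insertSeq, hf]
      have h1 := ih (Trie.mk .nil) (c + 1)
      have h2 := sizeC_appendC tok (insertSeq (Trie.mk .nil) (c + 1) rest).1 cs
      simp only [sizeT] at *
      simp only [sizeC] at h1
      omega
    · simp only [insertSeq, hf]
      have h1 := ih child c
      have h2 := sizeC_updateC (t' := (insertSeq child c rest).1) hf
      simp only [sizeT] at *
      omega

theorem insertSeq_WF (s : List Int) : ∀ (t : Trie) (c : Int), WFT t → WFT (insertSeq t c s).1 := by
  induction s with
  | nil => intro t c hw; simpa [insertSeq] using hw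
  | cons tok rest ih =>
    rintro ⟨cs⟩ c ⟨hwc, hnd⟩
    rcases hf : findC tok cs with _ | child
    · simp only [insertSeq, hf]
      refine ⟨WFC_appendC (ih (Trie.mk .nil) (c + 1) ⟨trivial, List.nodup_nil⟩) hwc, ?_⟩
      rw [keysC_appendC]
      exact List.Nodup.append hnd (List.nodup_singleton tok)
        (by simpa using List.disjoint_singleton.mpr ((findC_eq_none_iff tok cs).mp hf))
    · simp only [insertSeq, hf]
      refine ⟨WFC_updateC (ih child c (WFT_of_findC hf hwc)) hwc, ?_⟩
      rw [keysC_updateC]; exact hnd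

theorem insertSeq_mem (s : List Int) : ∀ (t : Trie) (c : Int), WFT t → ∀ p : List Int,
    (p ∈ pathsT (insertSeq t c s).1 ↔ p ∈ pathsT t ∨ p ∈ prefixesNE s) := by
  induction s with
  | nil => intro t c _ p; simp [insertSeq, prefixesNE]
  | cons tok rest ih =>
    rintro ⟨cs⟩ c ⟨hwc, hnd⟩ p
    rcases hf : findC tok cs with _ | child
    · -- fresh key: children list grows at the end
      simp only [insertSeq, hf, pathsT, pathsC_appendC, prefixesNE]
      have hmem := ih (Trie.mk .nil) (c + 1) ⟨trivial, List.nodup_nil⟩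
      simp only [List.mem_append, List.mem_cons, List.mem_map]
      constructor
      · rintro (h | rfl | ⟨q, hq, rfl⟩)
        · exact Or.inl h
        · exact Or.inr (Or.inl rfl)
        · rcases (hmem q).mp hq with h | h
          · simp [pathsT, pathsC] at h
          · exact Or.inr (Or.inr ⟨q, h, rfl⟩)
      · rintro (h | rfl | ⟨q, hq, rfl⟩)
        · exact Or.inl h
        · exact Or.inr (Or.inl rfl)
        · exact Or.inr (Or.inr ⟨q, (hmem q).mpr (Or.inr hq), rfl⟩)
    · -- existing key: the child subtree is replaced by its updated version
      simp only [insertSeq, hf, pathsT]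
      rw [mem_pathsC_updateC _ p hnd hf]
      have hmem := ih child c (WFT_of_findC hf hwc)
      have hsub := mem_pathsC_of_findC hf
      simp only [prefixesNE, List.mem_cons, List.mem_map]
      constructor
      · rintro (⟨hp, _⟩ | rfl | ⟨q, hq, rfl⟩)
        · exact Or.inl hp
        · exact Or.inr (Or.inl rfl)
        · rcases (hmem q).mp hq with h | h
          · exact Or.inl (hsub.2 q h)
          · exact Or.inr (Or.inr ⟨q, h, rfl⟩)
      · rintro (hp | rfl | ⟨q, hq, rfl⟩)
        · by_cases hx : ∃ q, p = tok :: q ∧ q ∈ pathsT child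
          · obtain ⟨q, rfl, hq⟩ := hx
            exact Or.inr (Or.inr ⟨q, (hmem q).mpr (Or.inl hq), rfl⟩)
          · refine Or.inl ⟨hp, ?_⟩
            rintro q rfl hq
            exact hx ⟨q, rfl, hq⟩
        · exact Or.inr (Or.inl rfl)
        · exact Or.inr (Or.inr ⟨q, (hmem q).mpr (Or.inr hq), rfl⟩)

mutual
theorem pathsT_nodup : ∀ t : Trie, WFT t → (pathsT t).Nodup
  | .mk cs => fun h => pathsC_nodup cs h.1 h.2
theorem pathsC_nodup : ∀ cs : ChildList, WFC cs → (keysC cs).Nodup → (pathsC cs).Nodup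
  | .nil => fun _ _ => List.nodup_nil
  | .cons k t r => fun hw hk => by
    have hk' : k ∉ keysC r := (List.nodup_cons.mp (by simpa [keysC] using hk)).1
    have hndr : (keysC r).Nodup := (List.nodup_cons.mp (by simpa [keysC] using hk)).2
    simp only [pathsC]
    rw [List.nodup_cons]
    refine ⟨?_, List.Nodup.append ((pathsT_nodup t hw.1).map (fun a b h => by
        injection h) ) (pathsC_nodup r hw.2 hndr) ?_⟩
    · simp only [List.mem_append, List.mem_map]
      rintro (⟨q, hq, he⟩ | hm)
      · rw [List.cons.injEq] at he
        exact nil_not_mem_pathsT t (he.2 ▸ hq)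
      · obtain ⟨k', q', hp, hkk⟩ := head_of_mem_pathsC hm
        rw [List.cons.injEq] at hp
        exact hk' (hp.1 ▸ hkk)
    · intro x hx hy
      obtain ⟨q, _, rfl⟩ := List.mem_map.mp hx
      obtain ⟨k', q', hp, hkk⟩ := head_of_mem_pathsC hy
      rw [List.cons.injEq] at hp
      exact hk' (hp.1 ▸ hkk)
end

mutual
theorem pathsT_length : ∀ t : Trie, (pathsT t).length = sizeT t
  | .mk cs => pathsC_length cs
theorem pathsC_length : ∀ cs : ChildList, (pathsC cs).length = sizeC cs
  | .nil => rfl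
  | .cons k t r => by
    simp [pathsC, sizeC, pathsT_length t, pathsC_length r]; omega
end

theorem bInner_fold_mem (s : List Int) : ∀ (pref : List Int) (S : PySem.Set (List Int)) (x : List Int),
    x ∈ (s.foldl bInner (pref, S)).2 ↔ x ∈ S ∨ ∃ q ∈ prefixesNE s, x = pref ++ q := by
  induction s with
  | nil => intro pref S x; simp [prefixesNE]
  | cons a rest ih =>
    intro pref S x
    simp only [List.foldl_cons, bInner]
    rw [ih]
    simp only [PySem.Set.mem_add, prefixesNE, List.mem_cons, List.mem_map]
    constructor
    · rintro ((h | rfl) | ⟨q, hq, rfl⟩)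
      · exact Or.inl h
      · exact Or.inr ⟨[a], Or.inl rfl, rfl⟩
      · exact Or.inr ⟨a :: q, Or.inr ⟨q, hq, rfl⟩, by simp⟩
    · rintro (h | ⟨q, (rfl | ⟨q', hq', rfl⟩), rfl⟩)
      · exact Or.inl (Or.inl h)
      · exact Or.inl (Or.inr rfl)
      · exact Or.inr ⟨q', hq', by simp⟩

theorem bInner_fold_nodup (s : List Int) : ∀ (pref : List Int) (S : PySem.Set (List Int)),
    S.Nodup → (s.foldl bInner (pref, S)).2.Nodup := by
  induction s with
  | nil => intro pref S h; exact h
  | cons a rest ih =>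
    intro pref S h
    simp only [List.foldl_cons, bInner]
    exact ih _ _ (PySem.Set.nodup_add S (pref ++ [a]) h)

theorem main_aux (tls : List (List Int)) : ∀ (t : Trie) (c : Int) (S : PySem.Set (List Int)),
    WFT t → c = (sizeT t : Int) → S.Nodup → (∀ x, x ∈ pathsT t ↔ x ∈ S) →
    (tls.foldl stepA (t, c)).2 = PySem.Set.len (tls.foldl bOuter S) := by
  induction tls with
  | nil =>
    intro t c S hw hc hS hmem
    have hperm : List.Perm (pathsT t) S := (List.perm_ext_iff_of_nodup (pathsT_nodup t hw) hS).mpr hmem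
    simp only [List.foldl_nil, PySem.Set.len]
    rw [hc, ← hperm.length_eq, pathsT_length]
  | cons seq rest ih =>
    intro t c S hw hc hS hmem
    simp only [List.foldl_cons]
    rw [show stepA (t, c) seq = insertSeq t c seq from rfl]
    refine ih _ _ _ (insertSeq_WF seq t c hw) ?_ (bInner_fold_nodup seq [] S hS) ?_
    · have h1 := insertSeq_snd seq t c
      omega
    · intro x
      rw [insertSeq_mem seq t c hw x, bOuter, bInner_fold_mem seq [] S x]
      simp only [List.nil_append, hmem x]
      constructor
      · rintro (h | h)
        · exact Or.inl h
        · exact Or.inr ⟨x, h, rfl⟩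
      · rintro (h | ⟨q, hq, rfl⟩)
        · exact Or.inl h
        · exact Or.inr hq

-- ===== VERDICT (by name: the statement is the Claim_ definition above) =====
theorem min_with_trie_spec : Claim_equal_min_with_trie := by
  intro tls _
  show min_with_trie tls = min_with_trie_alt tls
  unfold min_with_trie min_with_trie_alt
  exact main_aux tls (Trie.mk .nil) 0 PySem.Set.empty
    ⟨trivial, List.nodup_nil⟩ rfl List.nodup_nil (by intro x; simp [pathsT, pathsC, PySem.Set.empty])
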